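-- pv_equiv track=rewrite | github.com/spottenn/pokemon-gym | pokemon_env/emulator.py | _can_move_between_tiles
-- ===== SOURCE A (Python) =====
-- def _can_move_between_tiles(tile1: int, tile2: int, tileset: str) -> bool:
--     """
--     Check if movement between two tiles is allowed based on tile pair collision data.
--
--     Args:
--         tile1: The tile being moved from
--         tile2: The tile being moved to
--         tileset: The current tileset name
--
--     Returns:
--         bool: True if movement is allowed, False if blocked
--     """
--     # Tile pair collision data
--     TILE_PAIR_COLLISIONS_LAND = [
--         ("CAVERN", 288, 261),
--         ("CAVERN", 321, 261),
--         ("FOREST", 304, 302),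
--         ("CAVERN", 298, 261),
--         ("CAVERN", 261, 289),
--         ("FOREST", 338, 302),
--         ("FOREST", 341, 302),
--         ("FOREST", 342, 302),
--         ("FOREST", 288, 302),
--         ("FOREST", 350, 302),
--         ("FOREST", 351, 302),
--     ]
--
--     TILE_PAIR_COLLISIONS_WATER = [
--         ("FOREST", 276, 302),
--         ("FOREST", 328, 302),
--         ("CAVERN", 276, 261),
--     ]
--
--     # Check both land and water collisions
--     for ts, t1, t2 in TILE_PAIR_COLLISIONS_LAND + TILE_PAIR_COLLISIONS_WATER:
--         if ts == tileset:
--             # Check both directions since collisions are bidirectional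
--             if (tile1 == t1 and tile2 == t2) or (tile1 == t2 and tile2 == t1):
--                 return False
--
--     return True
-- ===== SOURCE B (Python) =====
-- # Hub-and-spoke reformulation: every blocked pair in the data shares one "hub"
-- # tile per tileset (CAVERN: 261, FOREST: 302); movement is blocked exactly when
-- # one tile is the hub and the other is one of that tileset's spoke tiles.
-- def _can_move_between_tiles(tile1: int, tile2: int, tileset: str) -> bool:
--     if tileset == "CAVERN":
--         hub, spokes = 261, {288, 321, 298, 289, 276}
--     elif tileset == "FOREST":
--         hub, spokes = 302, {304, 338, 341, 342, 288, 350, 351, 276, 328}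
--     else:
--         return True
--     if tile1 == hub:
--         return tile2 not in spokes
--     if tile2 == hub:
--         return tile1 not in spokes
--     return True
-- ===== Notes on version B (the rewrite author's own statement) =====
-- stated objective: simpler
-- what changed: Replaces the scan over a 14-entry pair list with a hub-and-spoke reformulation: each tileset has one hub tile (CAVERN 261, FOREST 302), so B branches on the tileset and answers by one hub equality test plus membership of the other tile in that tileset's spoke set, with no pair table and no bidirectional branch.
import Mathlib
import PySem

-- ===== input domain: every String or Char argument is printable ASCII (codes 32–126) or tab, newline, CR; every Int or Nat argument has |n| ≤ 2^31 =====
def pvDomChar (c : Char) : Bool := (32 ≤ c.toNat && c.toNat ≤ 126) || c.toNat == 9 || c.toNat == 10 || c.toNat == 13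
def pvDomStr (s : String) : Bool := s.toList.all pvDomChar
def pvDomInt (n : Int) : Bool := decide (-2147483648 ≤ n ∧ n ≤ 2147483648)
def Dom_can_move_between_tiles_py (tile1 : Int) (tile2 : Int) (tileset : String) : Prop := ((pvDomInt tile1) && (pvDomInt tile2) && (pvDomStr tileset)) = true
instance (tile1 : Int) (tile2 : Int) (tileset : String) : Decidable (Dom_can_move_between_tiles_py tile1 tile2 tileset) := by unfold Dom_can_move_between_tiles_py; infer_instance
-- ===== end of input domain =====

-- B replaces the pair-list scan by a hub-and-spoke rule per tileset (one hub
-- equality test plus spoke-set membership); objective: simpler.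


-- ===== PORT A =====
-- the concatenated literal table TILE_PAIR_COLLISIONS_LAND + TILE_PAIR_COLLISIONS_WATER
def pvCollisionsA : List (String × Int × Int) :=
  [("CAVERN", 288, 261), ("CAVERN", 321, 261), ("FOREST", 304, 302),
   ("CAVERN", 298, 261), ("CAVERN", 261, 289), ("FOREST", 338, 302),
   ("FOREST", 341, 302), ("FOREST", 342, 302), ("FOREST", 288, 302),
   ("FOREST", 350, 302), ("FOREST", 351, 302)] ++
  [("FOREST", 276, 302), ("FOREST", 328, 302), ("CAVERN", 276, 261)]

-- the for-loop with early `return False`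
def pvLoopA (tile1 : Int) (tile2 : Int) (tileset : String) : List (String × Int × Int) → Bool
  | [] => true
  | (ts, t1, t2) :: rest =>
    if ts == tileset then
      if (tile1 == t1 && tile2 == t2) || (tile1 == t2 && tile2 == t1) then false
      else pvLoopA tile1 tile2 tileset rest
    else pvLoopA tile1 tile2 tileset rest

def can_move_between_tiles_py (tile1 : Int) (tile2 : Int) (tileset : String) : Bool :=
  pvLoopA tile1 tile2 tileset pvCollisionsA

-- ===== PORT B =====
-- the spoke sets (Python set literals)
def pvSpokesCavern : PySem.Set Int := PySem.Set.ofList [288, 321, 298, 289, 276]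
def pvSpokesForest : PySem.Set Int :=
  PySem.Set.ofList [304, 338, 341, 342, 288, 350, 351, 276, 328]

def can_move_between_tiles_py_alt (tile1 : Int) (tile2 : Int) (tileset : String) : Bool :=
  if tileset == "CAVERN" then
    if tile1 == 261 then !(pvSpokesCavern.contains tile2)
    else if tile2 == 261 then !(pvSpokesCavern.contains tile1)
    else true
  else if tileset == "FOREST" then
    if tile1 == 302 then !(pvSpokesForest.contains tile2)
    else if tile2 == 302 then !(pvSpokesForest.contains tile1)
    else true
  else true

-- ===== PRECONDITION & SPEC =====
def Spec_can_move_between_tiles_py (tile1 : Int) (tile2 : Int) (tileset : String) (out : Bool) : Prop := out = can_move_between_tiles_py_alt tile1 tile2 tileset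
instance (tile1 : Int) (tile2 : Int) (tileset : String) (out : Bool) : Decidable (Spec_can_move_between_tiles_py tile1 tile2 tileset out) := by unfold Spec_can_move_between_tiles_py; infer_instance

-- ===== CLAIM =====
def Claim_equal_can_move_between_tiles_py : Prop := ∀ (tile1 : Int) (tile2 : Int) (tileset : String), Dom_can_move_between_tiles_py tile1 tile2 tileset → Spec_can_move_between_tiles_py tile1 tile2 tileset (can_move_between_tiles_py tile1 tile2 tileset)

-- ===== LEMMAS AND PROOFS =====

theorem pvLoopA_eq_any (t1 t2 : Int) (ts : String) :
    ∀ L : List (String × Int × Int),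
      pvLoopA t1 t2 ts L
        = !(L.any fun e => (e.1 == ts) && ((t1 == e.2.1 && t2 == e.2.2) || (t1 == e.2.2 && t2 == e.2.1))) := by
  intro L
  induction L with
  | nil => rfl
  | cons e rest ih =>
    obtain ⟨s, c, d⟩ := e
    simp only [pvLoopA, List.any_cons, Bool.not_or]
    cases hs : (s == ts)
    · simpa using ih
    · cases hc : ((t1 == c && t2 == d) || (t1 == d && t2 == c))
      · simpa using ih
      · simp [hc]

theorem pvSpokesCavern_contains (t : Int) :
    pvSpokesCavern.contains t = (t == 288 || t == 321 || t == 298 || t == 289 || t == 276) := by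
  have h : pvSpokesCavern = [288, 321, 298, 289, 276] := by decide
  rw [Bool.eq_iff_iff]
  simp [h, PySem.Set.contains]
  tauto

theorem pvSpokesForest_contains (t : Int) :
    pvSpokesForest.contains t
      = (t == 304 || t == 338 || t == 341 || t == 342 || t == 288 || t == 350 || t == 351 || t == 276 || t == 328) := by
  have h : pvSpokesForest = [304, 338, 341, 342, 288, 350, 351, 276, 328] := by decide
  rw [Bool.eq_iff_iff]
  simp [h, PySem.Set.contains]
  tauto

theorem pvA_cavern (t1 t2 : Int) :
    can_move_between_tiles_py t1 t2 "CAVERN" = can_move_between_tiles_py_alt t1 t2 "CAVERN" := by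
  rw [can_move_between_tiles_py, pvLoopA_eq_any]
  rw [can_move_between_tiles_py_alt]
  rw [Bool.eq_iff_iff]
  simp only [pvCollisionsA, List.cons_append, List.nil_append, List.any_cons, List.any_nil,
    pvSpokesCavern_contains, beq_iff_eq, reduceIte, Bool.true_and,
    Bool.false_and, Bool.or_false, Bool.false_or, Bool.not_eq_true', Bool.or_eq_false_iff,
    Bool.and_eq_false_iff, decide_eq_true_eq,
    decide_eq_false_iff_not, String.reduceBEq, String.reduceEq]
  split_ifs <;> simp_all <;> omega

theorem pvA_forest (t1 t2 : Int) :
    can_move_between_tiles_py t1 t2 "FOREST" = can_move_between_tiles_py_alt t1 t2 "FOREST" := by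
  rw [can_move_between_tiles_py, pvLoopA_eq_any]
  rw [can_move_between_tiles_py_alt]
  rw [Bool.eq_iff_iff]
  simp only [pvCollisionsA, List.cons_append, List.nil_append, List.any_cons, List.any_nil,
    pvSpokesForest_contains, beq_iff_eq, reduceIte, Bool.true_and,
    Bool.false_and, Bool.or_false, Bool.false_or, Bool.not_eq_true', Bool.or_eq_false_iff,
    Bool.and_eq_false_iff, decide_eq_true_eq,
    decide_eq_false_iff_not, String.reduceBEq, String.reduceEq]
  split_ifs <;> simp_all <;> omega

theorem pvA_other (t1 t2 : Int) (ts : String) (hC : ts ≠ "CAVERN") (hF : ts ≠ "FOREST") :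
    can_move_between_tiles_py t1 t2 ts = can_move_between_tiles_py_alt t1 t2 ts := by
  have hC' : ("CAVERN" == ts) = false := by simp [Ne.symm hC]
  have hF' : ("FOREST" == ts) = false := by simp [Ne.symm hF]
  have hC'' : (ts == "CAVERN") = false := by simp [hC]
  have hF'' : (ts == "FOREST") = false := by simp [hF]
  rw [can_move_between_tiles_py, pvLoopA_eq_any]
  simp [can_move_between_tiles_py_alt, pvCollisionsA, hC', hF', hC'', hF'']

-- ===== VERDICT =====
theorem can_move_between_tiles_py_spec : Claim_equal_can_move_between_tiles_py := by
  intro t1 t2 ts _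
  unfold Spec_can_move_between_tiles_py
  by_cases hC : ts = "CAVERN"
  · subst hC; exact pvA_cavern t1 t2
  · by_cases hF : ts = "FOREST"
    · subst hF; exact pvA_forest t1 t2
    · exact pvA_other t1 t2 ts hC hF
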